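-- pv_equiv track=rewrite | github.com/mkeilman/advent_py | year_2024/Day_12.py | _is_corner
-- ===== SOURCE A (Python) =====
-- def _is_corner(pos, region):
--     x = [x[0] for x in region]
--     y = [x[1] for x in region]
--     for i in (min(x), max(x)):
--         for j in (min(y), max(y)):
--             if pos == (i, j):
--                 return True
--     return False
-- ===== SOURCE B (Python) =====
-- def _is_corner(pos, region):
--     px, py = pos
--     x_extreme = (any(p[0] == px for p in region)
--                  and (all(p[0] >= px for p in region)
--                       or all(p[0] <= px for p in region)))
--     y_extreme = (any(p[1] == py for p in region)
--                  and (all(p[1] >= py for p in region)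
--                       or all(p[1] <= py for p in region)))
--     return x_extreme and y_extreme
-- ===== Notes on version B (the rewrite author's own statement) =====
-- stated objective: alternative
-- what changed: B never computes min/max or the corner set: it tests pos directly by predicates - each coordinate of pos must be attained in region and be extremal (all region coordinates on one side of it) - which characterises membership in {min,max} without computing them.
import Mathlib
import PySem

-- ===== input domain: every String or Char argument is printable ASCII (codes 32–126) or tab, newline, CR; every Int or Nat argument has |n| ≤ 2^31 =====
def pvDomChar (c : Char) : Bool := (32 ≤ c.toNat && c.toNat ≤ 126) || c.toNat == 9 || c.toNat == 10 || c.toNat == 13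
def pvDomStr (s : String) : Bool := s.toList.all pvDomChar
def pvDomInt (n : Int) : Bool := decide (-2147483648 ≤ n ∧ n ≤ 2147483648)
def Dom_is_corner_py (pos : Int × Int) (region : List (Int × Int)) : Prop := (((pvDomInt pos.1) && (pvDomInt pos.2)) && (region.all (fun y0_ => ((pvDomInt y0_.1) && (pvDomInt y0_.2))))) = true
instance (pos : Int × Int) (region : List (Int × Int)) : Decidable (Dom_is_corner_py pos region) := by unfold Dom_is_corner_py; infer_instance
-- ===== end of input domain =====

-- B tests pos directly by quantifier predicates (each coordinate attained and extremal in
-- region) instead of computing min/max extremes and a corner set (objective: alternative).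

-- ===== PORT A =====
-- x = [x[0] for x in region]; y = [x[1] for x in region]
-- for i in (min(x), max(x)): for j in (min(y), max(y)): if pos == (i, j): return True
-- return False     (min/max of an empty list raise ValueError → none; excluded by Pre_)
def is_corner_py (pos : Int × Int) (region : List (Int × Int)) : Bool :=
  let x := region.map (fun t => t.1)
  let y := region.map (fun t => t.2)
  match PySem.List.min? x (fun v => v), PySem.List.max? x (fun v => v),
        PySem.List.min? y (fun v => v), PySem.List.max? y (fun v => v) with
  | some mnx, some mxx, some mny, some mxy =>
      [mnx, mxx].any (fun i => [mny, mxy].any (fun j => pos == (i, j)))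
  | _, _, _, _ => false

-- ===== PORT B =====
-- px, py = pos; each coordinate must be attained (any ==) and extremal (all >= or all <=)
def is_corner_py_alt (pos : Int × Int) (region : List (Int × Int)) : Bool :=
  let px := pos.1
  let py := pos.2
  let x_extreme := (region.any (fun p => p.1 == px))
      && ((region.all (fun p => px ≤ p.1)) || (region.all (fun p => p.1 ≤ px)))
  let y_extreme := (region.any (fun p => p.2 == py))
      && ((region.all (fun p => py ≤ p.2)) || (region.all (fun p => p.2 ≤ py)))
  x_extreme && y_extreme

-- ===== PRECONDITION & SPEC =====
-- A raises ValueError on an empty region (min() of an empty sequence); excluded here.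
def Pre_is_corner_py (pos : Int × Int) (region : List (Int × Int)) : Prop := region ≠ []
instance (pos : Int × Int) (region : List (Int × Int)) : Decidable (Pre_is_corner_py pos region) := by unfold Pre_is_corner_py; infer_instance
def pvWitness_is_corner_py : (Int × Int) × (List (Int × Int)) := ((0, 2), [(0, 0), (3, 2), (1, 1)])

def Spec_is_corner_py (pos : Int × Int) (region : List (Int × Int)) (out : Bool) : Prop := out = is_corner_py_alt pos region
instance (pos : Int × Int) (region : List (Int × Int)) (out : Bool) : Decidable (Spec_is_corner_py pos region out) := by unfold Spec_is_corner_py; infer_instance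

-- ===== CLAIM =====
def Claim_equal_is_corner_py : Prop := ∀ (pos : Int × Int) (region : List (Int × Int)), Dom_is_corner_py pos region → Pre_is_corner_py pos region → Spec_is_corner_py pos region (is_corner_py pos region)

-- ===== LEMMAS AND PROOFS =====

-- elementary facts about the running min/max (A's min()/max() loops)
theorem pv_min_mem (t : List Int) : ∀ a : Int, t.foldl min a ∈ a :: t := by
  induction t with
  | nil => simp
  | cons b t ih =>
    intro a
    simp only [List.foldl_cons]
    rcases List.mem_cons.1 (ih (min a b)) with h | h
    · rcases min_choice a b with e | e <;> rw [e] at h ⊢ <;> simp [h]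
    · simp [h]

theorem pv_max_mem (t : List Int) : ∀ a : Int, t.foldl max a ∈ a :: t := by
  induction t with
  | nil => simp
  | cons b t ih =>
    intro a
    simp only [List.foldl_cons]
    rcases List.mem_cons.1 (ih (max a b)) with h | h
    · rcases max_choice a b with e | e <;> rw [e] at h ⊢ <;> simp [h]
    · simp [h]

theorem pv_min_le (t : List Int) : ∀ a b : Int, b ∈ a :: t → t.foldl min a ≤ b := by
  induction t with
  | nil => intro a b hb; simp at hb; simp [hb]
  | cons c t ih =>
    intro a b hb
    simp only [List.foldl_cons]
    have h0 : t.foldl min (min a c) ≤ min a c := ih (min a c) (min a c) (by simp)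
    rcases List.mem_cons.1 hb with rfl | hb'
    · exact le_trans h0 (min_le_left _ _)
    · rcases List.mem_cons.1 hb' with rfl | hb''
      · exact le_trans h0 (min_le_right _ _)
      · exact ih (min a c) b (List.mem_cons_of_mem _ hb'')

theorem pv_le_max (t : List Int) : ∀ a b : Int, b ∈ a :: t → b ≤ t.foldl max a := by
  induction t with
  | nil => intro a b hb; simp at hb; simp [hb]
  | cons c t ih =>
    intro a b hb
    simp only [List.foldl_cons]
    have h0 : max a c ≤ t.foldl max (max a c) := ih (max a c) (max a c) (by simp)
    rcases List.mem_cons.1 hb with rfl | hb'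
    · exact le_trans (le_max_left _ _) h0
    · rcases List.mem_cons.1 hb' with rfl | hb''
      · exact le_trans (le_max_right _ _) h0
      · exact ih (max a c) b (List.mem_cons_of_mem _ hb'')

-- v is the running min iff it occurs in a :: t and bounds it below; dually for max.
-- This is the bridge between A's computed extremes and B's predicates.
theorem pv_foldl_min_char (a : Int) (t : List Int) (v : Int) :
    v = t.foldl min a ↔ (v ∈ a :: t ∧ ∀ b ∈ a :: t, v ≤ b) := by
  constructor
  · rintro rfl; exact ⟨pv_min_mem t a, fun b hb => pv_min_le t a b hb⟩
  · rintro ⟨hv, hb⟩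
    exact le_antisymm (hb _ (pv_min_mem t a)) (pv_min_le t a v hv)

theorem pv_foldl_max_char (a : Int) (t : List Int) (v : Int) :
    v = t.foldl max a ↔ (v ∈ a :: t ∧ ∀ b ∈ a :: t, b ≤ v) := by
  constructor
  · rintro rfl; exact ⟨pv_max_mem t a, fun b hb => pv_le_max t a b hb⟩
  · rintro ⟨hv, hb⟩
    exact le_antisymm (pv_le_max t a v hv) (hb _ (pv_max_mem t a))

-- membership in {min, max} iff attained-and-extremal
theorem pv_extreme_iff (a : Int) (t : List Int) (v : Int) :
    (v = t.foldl min a ∨ v = t.foldl max a)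
      ↔ (v ∈ a :: t ∧ ((∀ b ∈ a :: t, v ≤ b) ∨ (∀ b ∈ a :: t, b ≤ v))) := by
  rw [pv_foldl_min_char, pv_foldl_max_char]
  tauto

-- B's attained-and-extremal booleans, as propositions over a :: t
theorem pv_alt_side (x0 : Int) (rest : List (Int × Int)) (f : Int × Int → Int) (v : Int) :
    ((x0 = v ∨ ∃ p ∈ rest, f p = v) ∧
      ((v ≤ x0 ∧ ∀ p ∈ rest, v ≤ f p) ∨ (x0 ≤ v ∧ ∀ p ∈ rest, f p ≤ v)))
      ↔ (v ∈ x0 :: rest.map f ∧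
          ((∀ b ∈ x0 :: rest.map f, v ≤ b) ∨ (∀ b ∈ x0 :: rest.map f, b ≤ v))) := by
  simp only [List.mem_cons, List.mem_map, forall_eq_or_imp, forall_exists_index, and_imp]
  constructor
  · rintro ⟨hm, hb⟩
    refine ⟨?_, ?_⟩
    · rcases hm with h | ⟨p, hp, he⟩
      · exact Or.inl h.symm
      · exact Or.inr ⟨p, hp, he⟩
    · rcases hb with h | h
      · exact Or.inl ⟨h.1, fun b p hp e => e ▸ h.2 p hp⟩
      · exact Or.inr ⟨h.1, fun b p hp e => e ▸ h.2 p hp⟩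
  · rintro ⟨hm, hb⟩
    refine ⟨?_, ?_⟩
    · rcases hm with h | ⟨p, hp, he⟩
      · exact Or.inl h.symm
      · exact Or.inr ⟨p, hp, he⟩
    · rcases hb with h | h
      · exact Or.inl ⟨h.1, fun p hp => h.2 (f p) p hp rfl⟩
      · exact Or.inr ⟨h.1, fun p hp => h.2 (f p) p hp rfl⟩

-- ===== VERDICT =====
theorem is_corner_py_spec : Claim_equal_is_corner_py := by
  rintro ⟨px, py⟩ region _ hpre
  unfold Spec_is_corner_py
  match region with
  | [] => exact absurd rfl hpre
  | (x0, y0) :: rest =>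
    simp only [is_corner_py, is_corner_py_alt, List.map_cons,
      PySem.List.min?_id_cons, PySem.List.max?_id_cons]
    rw [Bool.eq_iff_iff]
    simp only [List.any_cons, List.any_nil, List.all_cons, Bool.or_false, Bool.or_eq_true,
      Bool.and_eq_true, beq_iff_eq, Prod.mk.injEq, List.any_eq_true, List.all_eq_true,
      decide_eq_true_eq]
    rw [pv_alt_side x0 rest (fun t => t.1) px, pv_alt_side y0 rest (fun t => t.2) py]
    rw [← pv_extreme_iff x0 (rest.map (fun t => t.1)) px,
        ← pv_extreme_iff y0 (rest.map (fun t => t.2)) py]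
    tauto
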